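-- pv_equiv track=rewrite | github.com/bvachha/week2 | logStatApp/logstat/statsParsers/stats.py | get_req_by_stat_code
-- ===== SOURCE A (Python) =====
-- def get_req_by_stat_code(data):
--     """
--     aggregate the log data by number of requests per request code
--     :param data: log data
--     :return: sorted list of status code to requests pairs
--     """
--     result = {}
--     for record in data:
--         status = str(record.get("status_code"))
--         if not result.get(status):
--             result[status] = 0
--         result[status] += 1
--     return sorted(result.items())
-- ===== SOURCE B (Python) =====
-- def get_req_by_stat_code(data):
--     """
--     aggregate the log data by number of requests per request code
--     :param data: log data
--     :return: sorted list of status code to requests pairs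
--     """
--     keys = sorted(str(record.get("status_code")) for record in data)
--     result = []
--     for k in keys:
--         if result and result[-1][0] == k:
--             result[-1] = (k, result[-1][1] + 1)
--         else:
--             result.append((k, 1))
--     return result
-- ===== Notes on version B (the rewrite author's own statement) =====
-- stated objective: alternative
-- what changed: Replaces the dict aggregate-then-sort-items (guarded zero-init, += 1, sorted(result.items())) by sort-then-group: sort the stringified status codes first, then one linear run-length pass over the pre-sorted keys emits each (code, run length) pair already in order, with no dictionary and no trailing sort.
import Mathlib
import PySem

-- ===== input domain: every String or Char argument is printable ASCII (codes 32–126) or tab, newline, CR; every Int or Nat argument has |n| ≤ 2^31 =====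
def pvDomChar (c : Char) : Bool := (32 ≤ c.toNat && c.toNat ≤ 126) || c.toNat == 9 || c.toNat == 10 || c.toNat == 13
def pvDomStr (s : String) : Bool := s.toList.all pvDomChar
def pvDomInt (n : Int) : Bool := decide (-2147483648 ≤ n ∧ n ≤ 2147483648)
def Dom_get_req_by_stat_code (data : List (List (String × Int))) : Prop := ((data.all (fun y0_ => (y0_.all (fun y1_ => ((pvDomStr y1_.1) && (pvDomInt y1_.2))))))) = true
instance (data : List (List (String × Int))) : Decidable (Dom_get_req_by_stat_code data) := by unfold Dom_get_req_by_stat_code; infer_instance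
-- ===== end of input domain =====

-- B replaces A's dict aggregate-then-sort-items by sort-then-group: sort the stringified
-- codes, then one run-length pass emits the (code, count) pairs already in order; objective: alternative.

-- ===== PORT A =====
-- shared helper: str(record.get("status_code")) — str(None) = "None", str(n) = PySem.Int.toStr n
def statusKey (record : List (String × Int)) : String :=
  match (PySem.Dict.mk record).get? "status_code" with
  | none => "None"
  | some n => PySem.Int.toStr n

def get_req_by_stat_code (data : List (List (String × Int))) : List (String × Int) :=
  let result := data.foldl (fun result record =>
    let status := statusKey record
    -- if not result.get(status): result[status] = 0   (falsy = missing or 0)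
    let result := if (match result.get? status with
                      | none => true
                      | some v => v == 0) then result.insert status 0 else result
    -- result[status] += 1
    result.insert status (result.getD status 0 + 1)) PySem.Dict.empty
  PySem.List.sorted2 result.items Prod.fst Prod.snd   -- sorted(result.items()): tuple-lexicographic

-- ===== PORT B =====
-- the loop body: 'if result and result[-1][0] == k: result[-1] = (k, c+1) else: result.append((k, 1))'
def rleStep (result : List (String × Int)) (k : String) : List (String × Int) :=
  match result.getLast? with
  | some (k', c) => if k' = k then result.dropLast ++ [(k, c + 1)] else result ++ [(k, 1)]
  | none => [(k, 1)]

def get_req_by_stat_code_alt (data : List (List (String × Int))) : List (String × Int) :=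
  let keys := PySem.List.sorted (data.map statusKey) (fun x => x)
  keys.foldl rleStep []

-- ===== PRECONDITION & SPEC =====
def Spec_get_req_by_stat_code (data : List (List (String × Int))) (out : List (String × Int)) : Prop := out = get_req_by_stat_code_alt data
instance (data : List (List (String × Int))) (out : List (String × Int)) : Decidable (Spec_get_req_by_stat_code data out) := by unfold Spec_get_req_by_stat_code; infer_instance

-- ===== CLAIM (what is proved, stated in full; the proofs are below) =====
def Claim_equal_get_req_by_stat_code : Prop := ∀ (data : List (List (String × Int))), Dom_get_req_by_stat_code data → Spec_get_req_by_stat_code data (get_req_by_stat_code data)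

-- ===== LEMMAS AND PROOFS =====

-- A's loop body is, for every dict, the plain counting step.
lemma stepA_eq (r : PySem.Dict String Int) (s : String) :
    (let r1 := if (match r.get? s with
                   | none => true
                   | some v => v == 0) then r.insert s 0 else r
     r1.insert s (r1.getD s 0 + 1)) = r.insert s (r.getD s 0 + 1) := by
  cases h : r.get? s with
  | none =>
      simp only [if_true]
      rw [PySem.Dict.getD_insert_self, PySem.Dict.insert_insert_self,
        PySem.Dict.getD_of_get?_eq_none r 0 h]
  | some v =>
      by_cases hv : v = 0
      · subst hv
        simp only [beq_self_eq_true, if_true]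
        rw [PySem.Dict.getD_insert_self, PySem.Dict.insert_insert_self,
          PySem.Dict.getD_of_get?_eq_some r 0 h]
      · rw [if_neg (by simpa using hv)]

-- insertBy with two comparators agreeing on the inserted element vs the list
lemma insertBy_congr {α : Type} (b1 b2 : α → α → Bool) (x : α) :
    ∀ (ys : List α), (∀ y ∈ ys, b1 x y = b2 x y) →
      PySem.List.insertBy b1 x ys = PySem.List.insertBy b2 x ys := by
  intro ys h
  induction ys with
  | nil => rfl
  | cons y t ih =>
      simp only [PySem.List.insertBy]
      rw [h y (by simp)]
      cases b2 x y
      · simp only [Bool.false_eq_true, if_false]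
        rw [ih (fun z hz => h z (by simp [hz]))]
      · rfl

lemma foldl_insertBy_congr {α : Type} (b1 b2 : α → α → Bool) :
    ∀ (xs acc : List α),
      (∀ x ∈ xs, ∀ y, (y ∈ acc ∨ y ∈ xs) → b1 x y = b2 x y) →
      xs.foldl (fun a x => PySem.List.insertBy b1 x a) acc
        = xs.foldl (fun a x => PySem.List.insertBy b2 x a) acc := by
  intro xs
  induction xs with
  | nil => intro acc _; rfl
  | cons x t ih =>
      intro acc h
      simp only [List.foldl_cons]
      rw [insertBy_congr b1 b2 x acc (fun y hy => h x (by simp) y (Or.inl hy))]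
      apply ih
      intro z hz y hy
      apply h z (by simp [hz])
      rcases hy with hy | hy
      · rcases (PySem.List.mem_insertBy b2 x y acc).1 hy with rfl | hy
        · right; simp
        · left; exact hy
      · right; simp [hy]

-- on a list with pairwise-distinct first components, tuple-lexicographic sort is sort by fst
lemma sorted2_eq_sorted_fst (xs : List (String × Int)) (h : (xs.map Prod.fst).Nodup) :
    PySem.List.sorted2 xs Prod.fst Prod.snd = PySem.List.sorted xs Prod.fst := by
  rw [PySem.List.sorted_eq_foldl_insertBy]
  apply foldl_insertBy_congr
  intro x hx y hy
  rcases hy with hy | hy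
  · exact absurd hy (List.not_mem_nil)
  · by_cases hxy : x.1 = y.1
    · have : x = y := by
        have := List.inj_on_of_nodup_map h hx hy
        exact this hxy
      subst this
      simp
    · rcases lt_or_gt_of_ne hxy with hlt | hgt
      · simp [hlt, not_lt_of_gt hlt]
      · simp [hgt, not_lt_of_gt hgt]

-- A computes sorted(set(keys)) mapped over counts (via Counter)
lemma a_eq_sorted_set_counts (data : List (List (String × Int))) :
    get_req_by_stat_code data
      = (PySem.List.sorted (PySem.Set.ofList (data.map statusKey)) (fun x => x)).map
          (fun code => (code, ((data.map statusKey).count code : Int))) := by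
  show PySem.List.sorted2 (data.foldl (fun result record =>
      let status := statusKey record
      let result := if (match result.get? status with
                        | none => true
                        | some v => v == 0) then result.insert status 0 else result
      result.insert status (result.getD status 0 + 1)) PySem.Dict.empty).items Prod.fst Prod.snd
    = (PySem.List.sorted (PySem.Set.ofList (data.map statusKey)) (fun x => x)).map
          (fun code => (code, ((data.map statusKey).count code : Int)))
  have hfold : data.foldl (fun result record =>
      let status := statusKey record
      let result := if (match result.get? status with
                        | none => true
                        | some v => v == 0) then result.insert status 0 else result
      result.insert status (result.getD status 0 + 1)) PySem.Dict.empty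
      = PySem.Dict.counter (data.map statusKey) := by
    rw [← PySem.Dict.foldl_insert_getD_add_one_eq_counter, List.foldl_map]
    exact PySem.List.foldl_congr_mem _ _ _ _ (fun acc x _ => stepA_eq acc (statusKey x))
  rw [hfold, PySem.Dict.items_counter]
  set keys := data.map statusKey with hkeys
  set S := PySem.Set.ofList keys with hS
  set f : String → String × Int := fun k => (k, (keys.count k : Int)) with hf
  have hnodupS : S.Nodup := PySem.Set.nodup_ofList keys
  have hmapfst : (S.map f).map Prod.fst = S := by
    simp [hf, List.map_map, Function.comp_def]
  rw [sorted2_eq_sorted_fst (S.map f) (by rw [hmapfst]; exact hnodupS)]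
  apply PySem.List.sorted_eq_of_perm_of_pairwise_lt
  · exact (PySem.List.sorted_perm S (fun x => x) false).map f
  · rw [List.pairwise_map]
    have hle := PySem.List.sorted_pairwise S (fun x => x)
    have hnd : (PySem.List.sorted S (fun x => x)).Nodup :=
      ((PySem.List.sorted_perm S (fun x => x) false).nodup_iff).2 hnodupS
    have := hle.and hnd
    refine this.imp ?_
    intro a b hab
    simp only [hf]
    exact lt_of_le_of_ne hab.1 hab.2

-- B-side: set(xs) (first-occurrence dedup) is a sublist of xs
lemma foldl_add_sublist {α : Type} [BEq α] :
    ∀ (s acc : List α), List.Sublist (s.foldl PySem.Set.add acc) (acc ++ s) := by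
  intro s
  induction s with
  | nil => intro acc; simp
  | cons x t ih =>
      intro acc
      refine List.Sublist.trans (ih (PySem.Set.add acc x)) ?_
      have h : List.Sublist (PySem.Set.add acc x) (acc ++ [x]) := by
        simp only [PySem.Set.add]
        split
        · exact List.sublist_append_left acc [x]
        · exact List.Sublist.refl _
      simpa using h.append_right t

lemma ofList_sublist {α : Type} [BEq α] (s : List α) :
    List.Sublist (PySem.Set.ofList s) s := by
  simpa using foldl_add_sublist s []

-- set(xs ++ [k]) appends k iff it is new
lemma ofList_append_singleton (s : List String) (k : String) :
    PySem.Set.ofList (s ++ [k])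
      = if k ∈ s then PySem.Set.ofList s else PySem.Set.ofList s ++ [k] := by
  show List.foldl PySem.Set.add [] (s ++ [k]) = _
  rw [List.foldl_append]
  show PySem.Set.add (PySem.Set.ofList s) k = _
  simp only [PySem.Set.add]
  have hc : PySem.Set.contains (PySem.Set.ofList s) k = decide (k ∈ s) := by
    simp [PySem.Set.contains, PySem.Set.mem_ofList]
  rw [hc]
  by_cases hk : k ∈ s <;> simp [hk]

-- the last element of a pairwise-≤ list bounds it
lemma le_of_getLast?_pairwise (d : List String) (h : d.Pairwise (· ≤ ·)) (m : String)
    (hm : d.getLast? = some m) : ∀ x ∈ d, x ≤ m := by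
  have h2 : d.reverse.Pairwise (fun a b => b ≤ a) := by rwa [List.pairwise_reverse]
  have hh : d.reverse.head? = some m := by rwa [List.head?_reverse]
  intro x hx
  rw [← List.mem_reverse] at hx
  cases dr : d.reverse with
  | nil => simp [dr] at hx
  | cons y t =>
      rw [dr] at hh h2 hx
      simp only [List.head?_cons, Option.some.injEq] at hh
      subst hh
      rw [List.mem_cons] at hx
      rcases hx with hx | hx
      · exact le_of_eq hx
      · exact (List.pairwise_cons.1 h2).1 x hx

-- THE B-SIDE INVARIANT: the run-length pass over a ≤-sorted list yields the
-- first-occurrence-deduped keys paired with their multiplicities.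
lemma rle_eq_map_counts :
    ∀ (s : List String), s.Pairwise (· ≤ ·) →
      s.foldl rleStep [] = (PySem.Set.ofList s).map (fun j => (j, (s.count j : Int))) := by
  intro s
  induction s using List.reverseRecOn with
  | nil => intro _; rfl
  | append_singleton s k ih =>
      intro hs
      rw [List.pairwise_append] at hs
      have hs1 : s.Pairwise (· ≤ ·) := hs.1
      have hk : ∀ x ∈ s, x ≤ k := fun x hx => hs.2.2 x hx k (by simp)
      rw [List.foldl_append, List.foldl_cons, List.foldl_nil, ih hs1,
        ofList_append_singleton]
      by_cases hmem : k ∈ s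
      · -- k extends the last run
        rw [if_pos hmem]
        set d := PySem.Set.ofList s with hd
        have hkd : k ∈ d := (PySem.Set.mem_ofList s k).2 hmem
        have hdne : d ≠ [] := List.ne_nil_of_mem hkd
        have hdpw : d.Pairwise (· ≤ ·) := List.Pairwise.sublist (ofList_sublist s) hs1
        have hlast : d.getLast hdne = k := by
          have h1 : d.getLast hdne ≤ k := hk _ ((ofList_sublist s).subset (List.getLast_mem hdne))
          have h2 : k ≤ d.getLast hdne :=
            le_of_getLast?_pairwise d hdpw _ (List.getLast?_eq_some_getLast hdne) k hkd
          exact le_antisymm h1 h2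
        have hdecomp : d.dropLast ++ [k] = d := by
          rw [← hlast]; exact List.dropLast_concat_getLast hdne
        have hknotin : k ∉ d.dropLast := by
          have hnd : d.Nodup := PySem.Set.nodup_ofList s
          rw [← hdecomp, List.nodup_append] at hnd
          intro hcon
          exact hnd.2.2 k hcon k (by simp) rfl
        rw [← hdecomp]
        simp only [List.map_append, List.map_cons, List.map_nil, rleStep,
          List.getLast?_concat, if_true, List.dropLast_concat]
        congr 1
        · refine List.map_congr_left (fun j hj => ?_)
          have hjk : j ≠ k := fun he => hknotin (he ▸ hj)
          have hc0 : List.count j [k] = 0 := by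
            simp [Ne.symm hjk]
          simp [List.count_append, hc0]
        · have hc : (s ++ [k]).count k = s.count k + 1 := by
            simp [List.count_append]
          rw [hc]
          push_cast
          ring_nf
      · -- k starts a new run
        rw [if_neg hmem]
        have hcnt0 : s.count k = 0 := List.count_eq_zero.2 hmem
        have hck : (((s ++ [k]).count k : Nat) : Int) = 1 := by
          simp [List.count_append, hcnt0]
        have hmapeq : (PySem.Set.ofList s).map (fun j => (j, (s.count j : Int)))
            = (PySem.Set.ofList s).map (fun j => (j, ((s ++ [k]).count j : Int))) := by
          refine List.map_congr_left (fun j hj => ?_)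
          have hjs : j ∈ s := (PySem.Set.mem_ofList s j).1 hj
          have hjk : j ≠ k := fun he => hmem (he ▸ hjs)
          have hc0 : List.count j [k] = 0 := by
            simp [Ne.symm hjk]
          simp [List.count_append, hc0]
        rw [List.map_append, List.map_cons, List.map_nil, ← hmapeq, hck]
        by_cases hd : PySem.Set.ofList s = []
        · rw [hd]
          simp only [List.map_nil, List.nil_append, rleStep, List.getLast?_nil]
        · have hlastmem : (PySem.Set.ofList s).getLast hd ∈ s :=
            (ofList_sublist s).subset (List.getLast_mem hd)
          have hne : (PySem.Set.ofList s).getLast hd ≠ k :=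
            fun he => hmem (he ▸ hlastmem)
          simp only [rleStep, List.getLast?_map, List.getLast?_eq_some_getLast hd,
            Option.map_some, if_neg hne]

-- the two sorted distinct-key lists coincide
lemma sorted_set_eq (keys : List String) :
    PySem.List.sorted (PySem.Set.ofList keys) (fun x => x)
      = PySem.Set.ofList (PySem.List.sorted keys (fun x => x)) := by
  set s := PySem.List.sorted keys (fun x => x) with hsdef
  apply PySem.List.sorted_eq_of_perm_of_pairwise_lt
  · rw [List.perm_ext_iff_of_nodup (PySem.Set.nodup_ofList s) (PySem.Set.nodup_ofList keys)]
    intro a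
    rw [PySem.Set.mem_ofList, PySem.Set.mem_ofList, PySem.List.mem_sorted]
  · have hle : (PySem.Set.ofList s).Pairwise (· ≤ ·) :=
      List.Pairwise.sublist (ofList_sublist s) (PySem.List.sorted_pairwise keys (fun x => x))
    have hnd : (PySem.Set.ofList s).Nodup := PySem.Set.nodup_ofList s
    exact (hle.and hnd).imp (fun h => lt_of_le_of_ne h.1 h.2)

theorem get_req_by_stat_code_spec_aux (data : List (List (String × Int))) :
    get_req_by_stat_code data = get_req_by_stat_code_alt data := by
  rw [a_eq_sorted_set_counts]
  show _ = (PySem.List.sorted (data.map statusKey) (fun x => x)).foldl rleStep []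
  set keys := data.map statusKey with hkeys
  set s := PySem.List.sorted keys (fun x => x) with hsdef
  rw [rle_eq_map_counts s (PySem.List.sorted_pairwise keys (fun x => x)),
    sorted_set_eq keys]
  refine List.map_congr_left (fun j _ => ?_)
  rw [(PySem.List.sorted_perm keys (fun x => x) false).count_eq]

-- ===== VERDICT (by name: the statement is the Claim_ definition above) =====
theorem get_req_by_stat_code_spec : Claim_equal_get_req_by_stat_code := by
  intro data _
  exact get_req_by_stat_code_spec_aux data
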